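-- pv_equiv track=rewrite | github.com/kyrsant34/exercises | valid_braces.py | valid_braces
-- ===== SOURCE A (Python) =====
-- def valid_braces(s):
--     d = {'(': ')', '{': '}', '[': ']'}
--     expected = []
--     for ch in s:
--         if ch in d:
--             expected.append(d[ch])
--         elif not expected or ch != expected.pop():
--             return False
--
--     return True
-- ===== SOURCE B (Python) =====
-- def valid_braces(s):
--     prev = None
--     while s != prev:
--         prev = s
--         s = s.replace('()', '').replace('{}', '').replace('[]', '')
--     return s == ''
-- ===== Notes on version B (the rewrite author's own statement) =====
-- stated objective: alternative
-- what changed: Replaced the explicit stack of expected closers by repeated reduction: delete every adjacent '()', '{}', '[]' until a fixed point and test for the empty string; B also fixes A's missing final-stack check.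
-- intended difference: On strings whose closing brackets all match correctly but which leave unclosed openers (e.g. '(' or '(()'), A returns True because it never checks the leftover stack after the loop; B returns False, the intended answer for a brace-validity check. — e.g. on valid_braces("("): A returns true, B returns false
import Mathlib
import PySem

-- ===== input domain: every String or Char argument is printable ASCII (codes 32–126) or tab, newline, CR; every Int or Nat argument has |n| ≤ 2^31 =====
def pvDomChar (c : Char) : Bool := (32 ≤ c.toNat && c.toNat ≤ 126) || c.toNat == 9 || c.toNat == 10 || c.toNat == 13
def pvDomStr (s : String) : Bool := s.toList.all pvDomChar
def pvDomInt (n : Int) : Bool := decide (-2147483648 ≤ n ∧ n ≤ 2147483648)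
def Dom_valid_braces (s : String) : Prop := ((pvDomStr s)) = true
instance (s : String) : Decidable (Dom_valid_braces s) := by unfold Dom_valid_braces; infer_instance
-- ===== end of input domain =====

-- B replaces A's explicit stack of expected closers by repeated deletion of adjacent
-- matched pairs '()', '{}', '[]' until a fixed point, then tests for emptiness; it thereby
-- also fixes A's missing final-stack check (unclosed openers are rejected, see D_ below).

-- ===== PORT A =====
def vbDict : PySem.Dict Char Char := PySem.Dict.ofList [('(', ')'), ('{', '}'), ('[', ']')]

-- the for-loop of A: state 'expected', appended at the end and popped from the end as in Python
def vbALoop (expected : List Char) : List Char → Bool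
  | [] => true
  | ch :: rest =>
    match PySem.Dict.get? vbDict ch with
    | some v => vbALoop (expected ++ [v]) rest
    | none =>
      match PySem.List.pop? expected with
      | none => false
      | some (top, expected') => if ch ≠ top then false else vbALoop expected' rest

def valid_braces (s : String) : Bool := vbALoop [] s.toList

-- ===== PORT B =====
-- one pass of the while-loop body: the three .replace calls, in Source B's order
def vbStep (s : String) : String :=
  PySem.Str.replace (PySem.Str.replace (PySem.Str.replace s "()" "") "{}" "") "[]" ""

-- the while-loop; the fuel only makes it total (each productive iteration strictly
-- shrinks s, so s.length + 1 iterations always reach the fixed point)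
def vbBLoop : Nat → String → String
  | 0, s => s
  | n + 1, s => if vbStep s = s then s else vbBLoop n (vbStep s)

def valid_braces_alt (s : String) : Bool := vbBLoop (s.length + 1) s == ""

-- ===== PRECONDITION & SPEC =====
-- Independent reference matcher used only to STATE D_ (the residual stack of expected
-- closers; none = a mismatched closer occurs).  Used by neither port.
def vbChkStep (st : List Char) (a : Char) : Option (List Char) :=
  if a = '(' then some (')' :: st)
  else if a = '{' then some ('}' :: st)
  else if a = '[' then some (']' :: st)
  else match st with
       | [] => none
       | e :: st' => if a = e then some st' else none

def vbChk (st : List Char) : List Char → Option (List Char)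
  | [] => some st
  | a :: l => match vbChkStep st a with
              | none => none
              | some st' => vbChk st' l

-- On strings whose closing brackets all match correctly but which leave unclosed openers
-- (e.g. "(" or "(()"), A returns True because it never checks the leftover stack after its
-- loop; B returns False, the intended answer for a brace-validity check.
def D_valid_braces (s : String) : Prop :=
  (vbChk [] s.toList).isSome = true ∧ vbChk [] s.toList ≠ some []
instance (s : String) : Decidable (D_valid_braces s) := by unfold D_valid_braces; infer_instance

def Spec_valid_braces (s : String) (out : Bool) : Prop := ¬ D_valid_braces s → out = valid_braces_alt s
instance (s : String) (out : Bool) : Decidable (Spec_valid_braces s out) := by unfold Spec_valid_braces; infer_instance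

def pvDiffWitness_valid_braces : String := "("
def pvDiffWitnessOut_valid_braces : Bool × Bool := (true, false)

-- ===== CLAIM (what is proved, stated in full; the proofs are below) =====
def Claim_unchanged_valid_braces : Prop := ∀ (s : String), Dom_valid_braces s → Spec_valid_braces s (valid_braces s)
def Claim_changed_valid_braces : Prop := Dom_valid_braces (pvDiffWitness_valid_braces) ∧ D_valid_braces (pvDiffWitness_valid_braces) ∧ valid_braces (pvDiffWitness_valid_braces) = pvDiffWitnessOut_valid_braces.1 ∧ valid_braces_alt (pvDiffWitness_valid_braces) = pvDiffWitnessOut_valid_braces.2 ∧ pvDiffWitnessOut_valid_braces.1 ≠ pvDiffWitnessOut_valid_braces.2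
def Claim_exact_valid_braces : Prop := ∀ (s : String), Dom_valid_braces s → D_valid_braces s → valid_braces s ≠ valid_braces_alt s

-- ===== LEMMAS AND PROOFS =====

theorem vbDict_get? (ch : Char) : PySem.Dict.get? vbDict ch =
    (if ch = '(' then some ')' else if ch = '{' then some '}' else if ch = '[' then some ']' else none) := by
  have h : vbDict = PySem.Dict.mk [('(', ')'), ('{', '}'), ('[', ']')] := by rfl
  rw [h, PySem.Dict.get?_mk_cons, PySem.Dict.get?_mk_cons, PySem.Dict.get?_mk_cons]
  by_cases h1 : ch = '(' <;> by_cases h2 : ch = '{' <;> by_cases h3 : ch = '[' <;>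
    simp_all [PySem.Dict.get?]
  simp [Ne.symm h1, Ne.symm h2, Ne.symm h3]

-- A's loop is the reference matcher run on the reversed stack
theorem vb_a_eq_chk (l expected : List Char) :
    vbALoop expected l = (vbChk expected.reverse l).isSome := by
  induction l generalizing expected with
  | nil => simp [vbALoop, vbChk]
  | cons ch rest ih =>
    by_cases h1 : ch = '('
    · subst h1; simp [vbALoop, vbChk, vbChkStep, vbDict_get?, ih]
    · by_cases h2 : ch = '{'
      · subst h2; simp [vbALoop, vbChk, vbChkStep, vbDict_get?, ih]
      · by_cases h3 : ch = '['
        · subst h3; simp [vbALoop, vbChk, vbChkStep, vbDict_get?, ih]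
        · rcases List.eq_nil_or_concat expected with rfl | ⟨e', x, rfl⟩
          · simp [vbALoop, vbChk, vbChkStep, vbDict_get?, h1, h2, h3,
                  PySem.List.pop?, PySem.List.pyIdx?]
          · by_cases h4 : ch = x
            · subst h4
              simp [vbALoop, vbChk, vbChkStep, vbDict_get?, PySem.List.pop?_last, h1, h2, h3, ih]
            · simp [vbALoop, vbChk, vbChkStep, vbDict_get?, PySem.List.pop?_last, h1, h2, h3, h4]

-- simple recursion equal to PySem.Chars.replace [o, c] []
def vbRmv (o c : Char) : List Char → List Char
  | a :: b :: t => if a = o ∧ b = c then vbRmv o c t else a :: vbRmv o c (b :: t)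
  | l => l

theorem vb_go_eq (o c : Char) : ∀ (fuel : Nat) (l acc : List Char), l.length ≤ fuel →
    PySem.Chars.replace.go [o, c] [] fuel l acc = acc.reverse ++ vbRmv o c l := by
  intro fuel
  induction fuel with
  | zero =>
    intro l acc h
    have : l = [] := List.eq_nil_of_length_eq_zero (Nat.le_zero.mp h)
    subst this
    simp [PySem.Chars.replace.go, vbRmv]
  | succ n ih =>
    intro l acc h
    match l with
    | [] => simp [PySem.Chars.replace.go, vbRmv]
    | a :: t =>
      rw [PySem.Chars.replace.go]
      by_cases hp : List.isPrefixOf [o, c] (a :: t)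
      · rw [if_pos hp]
        match t with
        | [] => exact absurd hp (by simp [List.isPrefixOf])
        | b :: t' =>
          obtain ⟨rfl, rfl⟩ : o = a ∧ c = b := by simpa [List.isPrefixOf] using hp
          have hlen : t'.length ≤ n := by simp at h; omega
          rw [show List.drop ([o, c] : List Char).length (o :: c :: t') = t' from rfl,
              show ([] : List Char).reverse ++ acc = acc from by simp,
              ih t' acc hlen]
          simp [vbRmv]
      · rw [if_neg hp]
        have hlen : t.length ≤ n := by simp at h; omega
        rw [ih t (a :: acc) hlen]
        match t with
        | [] => simp [vbRmv]
        | b :: t' =>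
          have hne : ¬(a = o ∧ b = c) := by
            rintro ⟨rfl, rfl⟩; exact hp (by simp [List.isPrefixOf])
          simp [vbRmv, hne]

theorem vb_replace_eq_rmv (o c : Char) (l : List Char) :
    PySem.Chars.replace l [o, c] [] = vbRmv o c l := by
  rw [PySem.Chars.replace]
  simp [vb_go_eq o c l.length l [] le_rfl]

def vbIsOpen (a : Char) : Bool := a = '(' ∨ a = '{' ∨ a = '['
def vbCloseOf (a : Char) : Char := if a = '(' then ')' else if a = '{' then '}' else ']'

def vbPair (o c : Char) : Prop :=
  (o = '(' ∧ c = ')') ∨ (o = '{' ∧ c = '}') ∨ (o = '[' ∧ c = ']')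

theorem vbChkStep_open {a : Char} (h : vbIsOpen a = true) (st : List Char) :
    vbChkStep st a = some (vbCloseOf a :: st) := by
  simp [vbIsOpen] at h
  rcases h with rfl | rfl | rfl <;> simp [vbChkStep, vbCloseOf]

theorem vbChkStep_pair {o c : Char} (h : vbPair o c) (st : List Char) :
    vbChkStep st o = some (c :: st) ∧ vbChkStep (c :: st) c = some st := by
  rcases h with ⟨rfl, rfl⟩ | ⟨rfl, rfl⟩ | ⟨rfl, rfl⟩ <;> simp [vbChkStep]

theorem vbChk_rmv {o c : Char} (h : vbPair o c) :
    ∀ (l st : List Char), vbChk st (vbRmv o c l) = vbChk st l := by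
  intro l
  induction l using vbRmv.induct o c with
  | case1 a b t ht ih =>
    obtain ⟨rfl, rfl⟩ := ht
    intro st
    rw [vbRmv, if_pos ⟨rfl, rfl⟩, ih st]
    simp [vbChk, (vbChkStep_pair h st).1, (vbChkStep_pair h st).2]
  | case2 a b t ht ih =>
    intro st
    rw [vbRmv, if_neg ht]
    simp only [vbChk]
    cases vbChkStep st a with
    | none => rfl
    | some st' => exact ih st'
  | case3 l hl =>
    intro st
    match l, hl with
    | [], _ => rfl
    | [a], _ => rfl
    | a :: b :: t, hl => exact absurd rfl (fun h => hl a b t h)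

theorem vbRmv_length_le (o c : Char) (l : List Char) : (vbRmv o c l).length ≤ l.length := by
  induction l using vbRmv.induct o c with
  | case1 a b t ht ih => rw [vbRmv, if_pos ht]; simp; omega
  | case2 a b t ht ih => rw [vbRmv, if_neg ht]; simp at ih ⊢; omega
  | case3 l hl =>
    match l, hl with
    | [], _ => simp [vbRmv]
    | [a], _ => simp [vbRmv]
    | a :: b :: t, hl => exact absurd rfl (fun h => hl a b t h)

theorem vbRmv_eq_or_lt (o c : Char) (l : List Char) :
    vbRmv o c l = l ∨ (vbRmv o c l).length < l.length := by
  induction l using vbRmv.induct o c with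
  | case1 a b t ht ih =>
    right
    rw [vbRmv, if_pos ht]
    have := vbRmv_length_le o c t
    simp; omega
  | case2 a b t ht ih =>
    rw [vbRmv, if_neg ht]
    rcases ih with h | h
    · left; rw [h]
    · right; simp at h ⊢; omega
  | case3 l hl =>
    match l, hl with
    | [], _ => left; rfl
    | [a], _ => left; rfl
    | a :: b :: t, hl => exact absurd rfl (fun h => hl a b t h)

theorem vbRmv_fix_no_adj {o c : Char} {l : List Char} (h : vbRmv o c l = l) :
    ∀ u v, l ≠ u ++ o :: c :: v := by
  induction l using vbRmv.induct o c with
  | case1 a b t ht ih =>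
    obtain ⟨rfl, rfl⟩ := ht
    exfalso
    rw [vbRmv, if_pos ⟨rfl, rfl⟩] at h
    have := vbRmv_length_le a b t
    have := congrArg List.length h
    simp at this; omega
  | case2 a b t ht ih =>
    rw [vbRmv, if_neg ht] at h
    have h2 : vbRmv o c (b :: t) = b :: t := by
      injection h
    intro u v huv
    match u, huv with
    | [], huv =>
      injection huv with h1 huv
      injection huv with h2 _
      exact ht ⟨h1, h2⟩
    | x :: u', huv =>
      injection huv with _ huv
      exact ih h2 u' v huv
  | case3 l hl =>
    intro u v huv
    have h2 : l.length ≤ 1 := by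
      match l, hl with
      | [], _ => simp
      | [a], _ => simp
      | a :: b :: t, hl => exact absurd rfl (fun h => hl a b t h)
    rw [huv] at h2
    simp [List.length_append] at h2
    -- impossible: length ≥ 2
    omega

theorem vbChk_append (u v st : List Char) :
    vbChk st (u ++ v) = (vbChk st u).bind (fun st' => vbChk st' v) := by
  induction u generalizing st with
  | nil => simp [vbChk]
  | cons a t ih =>
    simp only [List.cons_append, vbChk]
    cases vbChkStep st a with
    | none => rfl
    | some st' => exact ih st'

theorem vbChk_allOpen {u : List Char} (h : ∀ a ∈ u, vbIsOpen a = true) (st : List Char) :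
    vbChk st u = some ((u.map vbCloseOf).reverse ++ st) := by
  induction u generalizing st with
  | nil => simp [vbChk]
  | cons a t ih =>
    simp only [vbChk, vbChkStep_open (h a (by simp))]
    rw [ih (fun x hx => h x (by simp [hx]))]
    simp

theorem vbPair_closeOf {o : Char} (h : vbIsOpen o = true) : vbPair o (vbCloseOf o) := by
  simp [vbIsOpen] at h
  rcases h with rfl | rfl | rfl <;> simp [vbPair, vbCloseOf]

-- a nonempty string that passes the checker with empty final stack has an adjacent matched pair
theorem vbChk_empty_adj {l : List Char} (hne : l ≠ [])
    (hchk : vbChk [] l = some []) :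
    ∃ o c u v, vbPair o c ∧ l = u ++ o :: c :: v := by
  have hsplit : List.takeWhile vbIsOpen l ++ List.dropWhile vbIsOpen l = l :=
    List.takeWhile_append_dropWhile
  have hallu : ∀ a ∈ List.takeWhile vbIsOpen l, vbIsOpen a = true :=
    fun a ha => List.mem_takeWhile_imp ha
  rcases hvv : List.dropWhile vbIsOpen l with _ | ⟨x, v'⟩
  · -- all characters open: final stack would have length l.length ≠ 0
    exfalso
    rw [hvv] at hsplit
    simp only [List.append_nil] at hsplit
    have hall : ∀ a ∈ l, vbIsOpen a = true := by
      intro a ha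
      exact hallu a (by rwa [hsplit])
    rw [vbChk_allOpen hall] at hchk
    simp only [Option.some.injEq, List.append_nil] at hchk
    have := congrArg List.length hchk
    simp at this
    exact hne this
  · have hx : vbIsOpen x = false := by
      have hdw : List.dropWhile vbIsOpen l ≠ [] := by rw [hvv]; simp
      have := List.head_dropWhile_not vbIsOpen hdw
      rwa [show (List.dropWhile vbIsOpen l).head hdw = x from by simp [hvv]] at this
    rw [hvv] at hsplit
    rcases List.eq_nil_or_concat (List.takeWhile vbIsOpen l) with hu0 | ⟨u', o, huo⟩
    · -- first char not open: checker dies immediately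
      exfalso
      rw [hu0, List.nil_append] at hsplit
      rw [← hsplit] at hchk
      simp only [vbChk] at hchk
      have hstep : vbChkStep [] x = none := by
        simp [vbIsOpen] at hx
        simp [vbChkStep, hx.1, hx.2.1, hx.2.2]
      rw [hstep] at hchk
      simp at hchk
    · have ho : vbIsOpen o = true := hallu o (by simp [huo])
      rw [huo, List.concat_eq_append] at hsplit
      have hl : l = u' ++ o :: x :: v' := by rw [← hsplit]; simp
      have hallu' : ∀ a ∈ u' ++ [o], vbIsOpen a = true := by
        rw [← List.concat_eq_append, ← huo]; exact hallu
      have hrun : vbChk [] ((u' ++ [o]) ++ (x :: v')) = some [] := by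
        rw [hsplit]; exact hchk
      rw [vbChk_append, vbChk_allOpen hallu'] at hrun
      simp only [Option.bind_some, List.map_append, List.map_cons, List.map_nil,
        List.reverse_append, List.reverse_cons, List.reverse_nil, List.nil_append,
        List.append_nil, List.cons_append] at hrun
      have hxo : x = vbCloseOf o := by
        by_contra hxo
        simp only [vbChk] at hrun
        have hstep : vbChkStep (vbCloseOf o :: (List.map vbCloseOf u').reverse) x = none := by
          simp [vbIsOpen] at hx
          simp [vbChkStep, hx.1, hx.2.1, hx.2.2, hxo]
        rw [hstep] at hrun
        simp at hrun
      exact ⟨o, vbCloseOf o, u', v', vbPair_closeOf ho, by rw [hl, hxo]⟩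

-- one while-loop pass, on the list side
def vbStepL (l : List Char) : List Char :=
  vbRmv '[' ']' (vbRmv '{' '}' (vbRmv '(' ')' l))

theorem vbPair_paren : vbPair '(' ')' := by simp [vbPair]
theorem vbPair_brace : vbPair '{' '}' := by simp [vbPair]
theorem vbPair_brack : vbPair '[' ']' := by simp [vbPair]

theorem vbStep_toList (s : String) : (vbStep s).toList = vbStepL s.toList := by
  rw [vbStep, PySem.Str.toList_replace, PySem.Str.toList_replace, PySem.Str.toList_replace]
  rw [show ("()" : String).toList = ['(', ')'] from rfl,
      show ("{}" : String).toList = ['{', '}'] from rfl,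
      show ("[]" : String).toList = ['[', ']'] from rfl,
      show ("" : String).toList = [] from rfl]
  rw [vb_replace_eq_rmv, vb_replace_eq_rmv, vb_replace_eq_rmv, vbStepL]

theorem vbChk_stepL (l : List Char) : vbChk [] (vbStepL l) = vbChk [] l := by
  rw [vbStepL, vbChk_rmv vbPair_brack, vbChk_rmv vbPair_brace, vbChk_rmv vbPair_paren]

theorem vbStepL_fix {l : List Char} (h : vbStepL l = l) :
    vbRmv '(' ')' l = l ∧ vbRmv '{' '}' l = l ∧ vbRmv '[' ']' l = l := by
  have e1 := vbRmv_eq_or_lt '(' ')' l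
  have e2 := vbRmv_eq_or_lt '{' '}' (vbRmv '(' ')' l)
  have e3 := vbRmv_eq_or_lt '[' ']' (vbRmv '{' '}' (vbRmv '(' ')' l))
  have l1 := vbRmv_length_le '(' ')' l
  have l2 := vbRmv_length_le '{' '}' (vbRmv '(' ')' l)
  have l3 := vbRmv_length_le '[' ']' (vbRmv '{' '}' (vbRmv '(' ')' l))
  rw [vbStepL] at h
  have hlen := congrArg List.length h
  have h1 : vbRmv '(' ')' l = l := by
    rcases e1 with h1 | h1
    · exact h1
    · omega
  rw [h1] at e2 e3 l2 l3 hlen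
  have h2 : vbRmv '{' '}' l = l := by
    rcases e2 with h2 | h2
    · exact h2
    · omega
  rw [h2] at e3 hlen
  have h3 : vbRmv '[' ']' l = l := by
    rcases e3 with h3 | h3
    · exact h3
    · omega
  exact ⟨h1, h2, h3⟩

theorem vbStepL_ne_lt {l : List Char} (h : vbStepL l ≠ l) :
    (vbStepL l).length < l.length := by
  have e1 := vbRmv_eq_or_lt '(' ')' l
  have e2 := vbRmv_eq_or_lt '{' '}' (vbRmv '(' ')' l)
  have e3 := vbRmv_eq_or_lt '[' ']' (vbRmv '{' '}' (vbRmv '(' ')' l))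
  have l1 := vbRmv_length_le '(' ')' l
  have l2 := vbRmv_length_le '{' '}' (vbRmv '(' ')' l)
  have l3 := vbRmv_length_le '[' ']' (vbRmv '{' '}' (vbRmv '(' ')' l))
  rw [vbStepL] at h ⊢
  rcases e1 with h1 | h1
  · rcases e2 with h2 | h2
    · rcases e3 with h3 | h3
      · exact absurd (by rw [h3, h2, h1]) h
      · omega
    · omega
  · omega

-- at a fixed point, checker success with empty stack forces the empty string
theorem vbStepL_fix_empty {l : List Char} (hfix : vbStepL l = l)
    (hchk : vbChk [] l = some []) : l = [] := by
  by_contra hne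
  obtain ⟨o, c, u, v, hp, hadj⟩ := vbChk_empty_adj hne hchk
  obtain ⟨h1, h2, h3⟩ := vbStepL_fix hfix
  rcases hp with ⟨rfl, rfl⟩ | ⟨rfl, rfl⟩ | ⟨rfl, rfl⟩
  · exact vbRmv_fix_no_adj h1 u v hadj
  · exact vbRmv_fix_no_adj h2 u v hadj
  · exact vbRmv_fix_no_adj h3 u v hadj

-- the while-loop reaches the fixed point and compares it with ""
theorem vbBLoop_eq_chk : ∀ (n : Nat) (s : String), s.toList.length < n →
    (vbBLoop n s == "") = decide (vbChk [] s.toList = some []) := by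
  intro n
  induction n with
  | zero => intro s h; omega
  | succ n ih =>
    intro s h
    rw [vbBLoop]
    by_cases hfix : vbStep s = s
    · rw [if_pos hfix]
      have hfixL : vbStepL s.toList = s.toList := by
        rw [← vbStep_toList, hfix]
      by_cases hc : vbChk [] s.toList = some []
      · have : s.toList = [] := vbStepL_fix_empty hfixL hc
        have hs : s = "" := String.toList_inj.mp (by rw [this]; rfl)
        simp [hs, vbChk]
      · have hs : s ≠ "" := by
          intro hs
          exact hc (by rw [hs]; rfl)
        simp [hs, hc]
    · rw [if_neg hfix]
      have hneL : vbStepL s.toList ≠ s.toList := by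
        intro he
        exact hfix (String.toList_inj.mp (by rw [vbStep_toList, he]))
      have hlt : (vbStep s).toList.length < n := by
        have := vbStepL_ne_lt hneL
        rw [vbStep_toList]
        omega
      rw [ih (vbStep s) hlt, vbStep_toList, vbChk_stepL]

theorem vb_b_eq_chk (s : String) :
    valid_braces_alt s = decide (vbChk [] s.toList = some []) := by
  rw [valid_braces_alt]
  exact vbBLoop_eq_chk (s.length + 1) s (by simp)

theorem vb_a_eq_chk' (s : String) :
    valid_braces s = (vbChk [] s.toList).isSome := by
  rw [valid_braces, vb_a_eq_chk s.toList []]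
  rfl

-- ===== VERDICT (by name: the statement is the Claim_ definition above) =====
theorem valid_braces_spec : Claim_unchanged_valid_braces := by
  intro s _
  rw [Spec_valid_braces]
  intro hnd
  rw [vb_a_eq_chk', vb_b_eq_chk]
  rcases hc : vbChk [] s.toList with _ | st
  · rfl
  · have hst : st = [] := by
      by_contra hst
      exact hnd ⟨by rw [hc]; rfl, by rw [hc]; simp [hst]⟩
    simp [hst]

theorem valid_braces_changed : Claim_changed_valid_braces := by
  unfold Claim_changed_valid_braces; decide

theorem valid_braces_tight : Claim_exact_valid_braces := by
  intro s _ hd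
  obtain ⟨h1, h2⟩ := hd
  rw [vb_a_eq_chk', vb_b_eq_chk, h1]
  simp [h2]
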